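-- pv_equiv track=rewrite | github.com/APodolskiy/programming_problems | stepik_course/sum_queries.py | solution
-- ===== SOURCE A (Python) =====
-- from typing import List
--
-- def solution(arr: List, queries: List) -> int:
--     n, m = len(arr), len(arr[0])
--     cum_sums = [[0 for _ in range(m + 1)] for _ in range(n + 1)]
--     sum_ans = 0
--
--     for j in range(1, m + 1):
--         col_cum_sum = 0
--         for i in range(1, n + 1):
--             col_cum_sum += arr[i - 1][j - 1]
--             cum_sums[i][j] = col_cum_sum
--             if j > 0:
--                 cum_sums[i][j] += cum_sums[i][j - 1]
--
--     for (i, k, j, l) in queries: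
--         if i != k or j != l:
--             rect_sum = cum_sums[k][l] - cum_sums[k][j - 1] - cum_sums[i - 1][l] + cum_sums[i - 1][j - 1]
--         else:
--             # i == k, j == l
--             rect_sum = arr[i - 1][j - 1]
--         sum_ans += rect_sum
--
--     return sum_ans
-- ===== SOURCE B (Python) =====
-- def solution(arr, queries):
--     n, m = len(arr), len(arr[0])
--     cum = [[sum(sum(row[:c]) for row in arr[:r]) for c in range(m + 1)]
--            for r in range(n + 1)]
--     sum_ans = 0
--     for (i, k, j, l) in queries:
--         sum_ans += cum[k][l] - cum[k][j - 1] - cum[i - 1][l] + cum[i - 1][j - 1]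
--     return sum_ans
-- ===== Notes on version B (the rewrite author's own statement) =====
-- stated objective: alternative
-- what changed: The dynamic-programming prefix-table build (running column accumulator plus left-neighbour addition) is replaced by brute force: every table entry is recomputed from scratch as the literal sum of its top-left submatrix obtained by slicing, with no recurrence and no running state, and the query loop uses the uniform inclusion-exclusion formula with no single-cell branch; B trades the O(n*m) DP build for an O(n^2*m^2) direct-summation build.
-- outside the precondition, e.g. on solution([[1, 2], [3, 4]], [(0, 0, 1, 1)]): A returns 3, B returns -4
import Mathlib
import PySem

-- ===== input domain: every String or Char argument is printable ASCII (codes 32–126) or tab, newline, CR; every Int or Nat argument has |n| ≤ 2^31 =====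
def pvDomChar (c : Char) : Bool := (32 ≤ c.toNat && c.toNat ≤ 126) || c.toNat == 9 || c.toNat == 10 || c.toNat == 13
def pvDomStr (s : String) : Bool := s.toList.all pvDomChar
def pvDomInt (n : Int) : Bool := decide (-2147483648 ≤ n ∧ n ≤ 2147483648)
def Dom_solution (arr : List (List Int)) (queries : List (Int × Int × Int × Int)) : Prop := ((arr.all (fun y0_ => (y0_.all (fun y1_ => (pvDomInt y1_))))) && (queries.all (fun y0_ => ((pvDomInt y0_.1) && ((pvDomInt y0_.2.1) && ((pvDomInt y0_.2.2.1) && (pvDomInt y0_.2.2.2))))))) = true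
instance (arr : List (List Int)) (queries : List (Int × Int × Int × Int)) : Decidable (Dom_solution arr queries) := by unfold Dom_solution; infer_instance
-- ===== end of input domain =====

-- B replaces A's dynamic-programming prefix-table build by brute force — every table entry
-- is recomputed from scratch as the literal sum of its top-left submatrix via slicing, with
-- no recurrence — and answers all queries with the uniform inclusion-exclusion formula.

-- ===== PORT A =====
-- xs[r][c] (2-dimensional read; pyGetD is Python indexing incl. negative wrap)
def pvGetCell (xs : List (List Int)) (r c : Int) : Int :=
  PySem.List.pyGetD (PySem.List.pyGetD xs r []) c 0

-- xs[r][c] = v (2-dimensional write)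
def pvSetCell (xs : List (List Int)) (r c : Int) (v : Int) : List (List Int) :=
  PySem.List.pySetD xs r (PySem.List.pySetD (PySem.List.pyGetD xs r []) c v)

def solution (arr : List (List Int)) (queries : List (Int × Int × Int × Int)) : Int :=
  let n : Int := (arr.length : Int)
  let m : Int := ((PySem.List.pyGetD arr 0 []).length : Int)
  let cum0 : List (List Int) :=
    (PySem.List.pyRange 0 (n + 1) 1).map (fun _ =>
      (PySem.List.pyRange 0 (m + 1) 1).map (fun _ => (0 : Int)))
  let cum :=
    (PySem.List.pyRange 1 (m + 1) 1).foldl (fun cum j =>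
      ((PySem.List.pyRange 1 (n + 1) 1).foldl (fun (st : Int × List (List Int)) i =>
        let cs := st.1 + pvGetCell arr (i - 1) (j - 1)
        let cum1 := pvSetCell st.2 i j cs
        let cum2 :=
          if 0 < j then
            pvSetCell cum1 i j (pvGetCell cum1 i j + pvGetCell cum1 i (j - 1))
          else cum1
        (cs, cum2)) (0, cum)).2) cum0
  queries.foldl (fun sumAns q =>
    let rectSum :=
      if q.1 ≠ q.2.1 ∨ q.2.2.1 ≠ q.2.2.2 then
        pvGetCell cum q.2.1 q.2.2.2 - pvGetCell cum q.2.1 (q.2.2.1 - 1) -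
          pvGetCell cum (q.1 - 1) q.2.2.2 + pvGetCell cum (q.1 - 1) (q.2.2.1 - 1)
      else
        pvGetCell arr (q.1 - 1) (q.2.2.1 - 1)
    sumAns + rectSum) 0

-- ===== PORT B =====
def solution_alt (arr : List (List Int)) (queries : List (Int × Int × Int × Int)) : Int :=
  let n : Int := (arr.length : Int)
  let m : Int := ((PySem.List.pyGetD arr 0 []).length : Int)
  let cum : List (List Int) :=
    (PySem.List.pyRange 0 (n + 1) 1).map (fun r =>
      (PySem.List.pyRange 0 (m + 1) 1).map (fun c =>
        ((PySem.List.slice arr none (some r)).map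
          (fun row => (PySem.List.slice row none (some c)).sum)).sum))
  queries.foldl (fun sumAns q =>
    sumAns +
      (pvGetCell cum q.2.1 q.2.2.2 - pvGetCell cum q.2.1 (q.2.2.1 - 1) -
        pvGetCell cum (q.1 - 1) q.2.2.2 + pvGetCell cum (q.1 - 1) (q.2.2.1 - 1))) 0

-- ===== PRECONDITION & SPEC =====
-- Pre_ excludes inputs on which Python A raises an IndexError (empty matrix, a row shorter
-- than row 0, a query index outside Python's wrap range for the table or, on a single-cell
-- query, for the matrix), and single-cell queries (i = k, j = l) whose cell is not inside
-- [1..n]x[1..m]: there A answers by a negatively-wrapped direct matrix read while B's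
-- uniform formula answers from the wrapped prefix table — an unspecified corner on which
-- both values are accidental.
def Pre_solution (arr : List (List Int)) (queries : List (Int × Int × Int × Int)) : Prop :=
  arr ≠ [] ∧
  (∀ row ∈ arr, (PySem.List.pyGetD arr 0 []).length ≤ row.length) ∧
  (∀ q ∈ queries,
    (q.1 = q.2.1 ∧ q.2.2.1 = q.2.2.2 →
      1 ≤ q.1 ∧ q.1 ≤ (arr.length : Int) ∧
      1 ≤ q.2.2.1 ∧ q.2.2.1 ≤ ((PySem.List.pyGetD arr 0 []).length : Int)) ∧
    (¬(q.1 = q.2.1 ∧ q.2.2.1 = q.2.2.2) →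
      -((arr.length : Int) + 1) ≤ q.1 - 1 ∧ q.1 - 1 ≤ (arr.length : Int) ∧
      -((arr.length : Int) + 1) ≤ q.2.1 ∧ q.2.1 ≤ (arr.length : Int) ∧
      -(((PySem.List.pyGetD arr 0 []).length : Int) + 1) ≤ q.2.2.1 - 1 ∧
        q.2.2.1 - 1 ≤ ((PySem.List.pyGetD arr 0 []).length : Int) ∧
      -(((PySem.List.pyGetD arr 0 []).length : Int) + 1) ≤ q.2.2.2 ∧
        q.2.2.2 ≤ ((PySem.List.pyGetD arr 0 []).length : Int)))
instance (arr : List (List Int)) (queries : List (Int × Int × Int × Int)) : Decidable (Pre_solution arr queries) := by unfold Pre_solution; infer_instance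

def pvWitness_solution : List (List Int) × (List (Int × Int × Int × Int)) :=
  ([[1, 2], [3, 4]], [(1, 2, 1, 2), (2, 2, 1, 1), (0, 2, 1, 1)])

def Spec_solution (arr : List (List Int)) (queries : List (Int × Int × Int × Int)) (out : Int) : Prop := out = solution_alt arr queries
instance (arr : List (List Int)) (queries : List (Int × Int × Int × Int)) (out : Int) : Decidable (Spec_solution arr queries out) := by unfold Spec_solution; infer_instance

-- ===== CLAIM (what is proved, stated in full; the proofs are below) =====
def Claim_equal_solution : Prop := ∀ (arr : List (List Int)) (queries : List (Int × Int × Int × Int)), Dom_solution arr queries → Pre_solution arr queries → Spec_solution arr queries (solution arr queries)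

-- ===== LEMMAS AND PROOFS =====

-- sum of column c (1-based), rows 1..i
def pvColS (arr : List (List Int)) (c i : Int) : Int :=
  ((PySem.List.pyRange 1 (i + 1) 1).map (fun r => pvGetCell arr (r - 1) (c - 1))).sum

-- prefix-rectangle sum: columns 1..j, rows 1..i
def pvS (arr : List (List Int)) (i j : Int) : Int :=
  ((PySem.List.pyRange 1 (j + 1) 1).map (fun c => pvColS arr c i)).sum

-- the (N x M) matrix of a function
def pvGrid (f : Nat → Nat → Int) (N M : Nat) : List (List Int) :=
  (List.range N).map (fun r => (List.range M).map (f r))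

theorem pvColS_zero (arr : List (List Int)) (c : Int) : pvColS arr c 0 = 0 := by
  simp [pvColS]

theorem pvColS_succ (arr : List (List Int)) (c i : Int) (h : 0 ≤ i) :
    pvColS arr c (i + 1) = pvColS arr c i + pvGetCell arr i (c - 1) := by
  unfold pvColS
  rw [PySem.List.pyRange_one_succ_right (by omega : (1:Int) ≤ i + 1)]
  simp

theorem pvS_zero (arr : List (List Int)) (i : Int) : pvS arr i 0 = 0 := by
  simp [pvS]

theorem pvS_zero_left (arr : List (List Int)) (j : Int) : pvS arr 0 j = 0 := by
  simp [pvS, pvColS_zero]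

theorem pvS_succ (arr : List (List Int)) (i j : Int) (h : 0 ≤ j) :
    pvS arr i (j + 1) = pvS arr i j + pvColS arr (j + 1) i := by
  unfold pvS
  rw [PySem.List.pyRange_one_succ_right (by omega : (1:Int) ≤ j + 1)]
  simp

theorem pvGrid_congr (f g : Nat → Nat → Int) (N M : Nat)
    (h : ∀ r < N, ∀ c < M, f r c = g r c) : pvGrid f N M = pvGrid g N M := by
  unfold pvGrid
  apply List.map_congr_left
  intro r hr
  apply List.map_congr_left
  intro c hc
  exact h r (List.mem_range.mp hr) c (List.mem_range.mp hc)

theorem pvGetRow_grid (f : Nat → Nat → Int) (N M : Nat) (r : Nat) (hr : r < N) :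
    PySem.List.pyGetD (pvGrid f N M) (r : Int) [] = (List.range M).map (f r) := by
  rw [PySem.List.pyGetD_natCast]
  simp [pvGrid, List.getD, hr]

theorem pvGetCell_grid (f : Nat → Nat → Int) (N M : Nat) (r c : Nat)
    (hr : r < N) (hc : c < M) :
    pvGetCell (pvGrid f N M) (r : Int) (c : Int) = f r c := by
  unfold pvGetCell
  rw [pvGetRow_grid f N M r hr, PySem.List.pyGetD_natCast]
  simp [List.getD, hc]

theorem pvSet_map_range {α : Type} (g : Nat → α) (M c : Nat) (_hc : c < M) (v : α) :
    ((List.range M).map g).set c v = (List.range M).map (fun c' => if c' = c then v else g c') := by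
  apply List.ext_getElem
  · simp
  · intro k h1 h2
    simp only [List.getElem_set, List.getElem_map, List.getElem_range]
    by_cases hk : c = k
    · subst hk
      simp
    · rw [if_neg hk, if_neg (fun h => hk h.symm)]

theorem pvSetCell_grid (f : Nat → Nat → Int) (N M : Nat) (r c : Nat)
    (hr : r < N) (hc : c < M) (v : Int) :
    pvSetCell (pvGrid f N M) (r : Int) (c : Int) v
      = pvGrid (fun r' c' => if r' = r ∧ c' = c then v else f r' c') N M := by
  unfold pvSetCell
  rw [pvGetRow_grid f N M r hr, PySem.List.pySetD_natCast, PySem.List.pySetD_natCast,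
    pvSet_map_range (f r) M c hc v]
  unfold pvGrid
  rw [pvSet_map_range (fun r' => (List.range M).map (f r')) N r hr]
  apply List.map_congr_left
  intro r' _
  by_cases h : r' = r
  · subst h
    rw [if_pos rfl]
    apply List.map_congr_left
    intro c' _
    by_cases h2 : c' = c
    · subst h2; simp
    · simp [h2]
  · rw [if_neg h]
    apply List.map_congr_left
    intro c' _
    simp [h]

-- A's inner loop over rows 1..p of column jn (1 ≤ jn ≤ m) transforms a grid state
theorem pvAInner (arr : List (List Int)) (n m jn : Nat) (hj1 : 1 ≤ jn) (hjm : jn ≤ m)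
    (f : Nat → Nat → Int) (p : Nat) (hp : p ≤ n) :
    (PySem.List.pyRange 1 ((p : Int) + 1) 1).foldl (fun (st : Int × List (List Int)) i =>
        let cs := st.1 + pvGetCell arr (i - 1) ((jn : Int) - 1)
        let cum1 := pvSetCell st.2 i (jn : Int) cs
        let cum2 :=
          if 0 < (jn : Int) then
            pvSetCell cum1 i (jn : Int)
              (pvGetCell cum1 i (jn : Int) + pvGetCell cum1 i ((jn : Int) - 1))
          else cum1
        (cs, cum2)) (0, pvGrid f (n + 1) (m + 1))
      = (pvColS arr (jn : Int) (p : Int),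
         pvGrid (fun r c => if 1 ≤ r ∧ r ≤ p ∧ c = jn
            then pvColS arr (jn : Int) (r : Int) + f r (jn - 1) else f r c) (n + 1) (m + 1)) := by
  induction p with
  | zero =>
      rw [show ((0 : Nat) : Int) + 1 = 1 by norm_num,
        PySem.List.pyRange_one_eq_nil (le_refl (1 : Int))]
      simp only [List.foldl_nil]
      refine Prod.ext ?_ ?_
      · exact (pvColS_zero arr (jn : Int)).symm
      · exact (pvGrid_congr _ _ _ _ (fun r _ c _ => by
          rw [if_neg (by omega)])).symm
  | succ p ih =>
      have hp' : p ≤ n := by omega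
      have hsplit : PySem.List.pyRange 1 (((p + 1 : Nat) : Int) + 1) 1
          = PySem.List.pyRange 1 ((p : Int) + 1) 1 ++ [(p : Int) + 1] := by
        push_cast
        exact PySem.List.pyRange_one_succ_right (by omega)
      rw [hsplit, List.foldl_append, ih hp']
      simp only [List.foldl_cons, List.foldl_nil]
      have hc1 : ((p : Int) + 1 - 1) = (p : Int) := by ring
      have hc2 : ((p : Int) + 1) = ((p + 1 : Nat) : Int) := by push_cast; ring
      have hc3 : ((jn : Int) - 1) = ((jn - 1 : Nat) : Int) := by omega
      simp only [hc1]
      rw [if_pos (by omega : (0 : Int) < (jn : Int))]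
      set fp : Nat → Nat → Int := fun r c => if 1 ≤ r ∧ r ≤ p ∧ c = jn
          then pvColS arr (jn : Int) (r : Int) + f r (jn - 1) else f r c with hfp
      have hcs : pvColS arr (jn : Int) (p : Int) + pvGetCell arr (p : Int) ((jn : Int) - 1)
          = pvColS arr (jn : Int) ((p : Int) + 1) := by
        rw [pvColS_succ arr (jn : Int) (p : Int) (by positivity)]
      rw [hcs, hc2, hc3]
      rw [pvSetCell_grid fp (n + 1) (m + 1) (p + 1) jn (by omega) (by omega)]
      set f1 : Nat → Nat → Int := fun r' c' => if r' = p + 1 ∧ c' = jn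
          then pvColS arr (jn : Int) ((p + 1 : Nat) : Int) else fp r' c' with hf1
      rw [pvGetCell_grid f1 (n + 1) (m + 1) (p + 1) jn (by omega) (by omega),
        pvGetCell_grid f1 (n + 1) (m + 1) (p + 1) (jn - 1) (by omega) (by omega),
        pvSetCell_grid f1 (n + 1) (m + 1) (p + 1) jn (by omega) (by omega)]
      have hf1a : f1 (p + 1) jn = pvColS arr (jn : Int) ((p + 1 : Nat) : Int) := by
        rw [hf1]; exact if_pos ⟨rfl, rfl⟩
      have hf1b : f1 (p + 1) (jn - 1) = f (p + 1) (jn - 1) := by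
        simp only [hf1, hfp]
        rw [if_neg (by omega), if_neg (by omega)]
      rw [hf1a, hf1b]
      refine Prod.ext rfl ?_
      apply pvGrid_congr
      intro r hr c hc
      by_cases hcase : r = p + 1 ∧ c = jn
      · obtain ⟨h1, h2⟩ := hcase
        subst h1
        simp only [hf1, hfp]
        rw [if_pos ⟨trivial, h2⟩, if_pos (by omega)]
      · simp only [hf1, hfp]
        rw [if_neg hcase, if_neg hcase]
        by_cases hd : 1 ≤ r ∧ r ≤ p ∧ c = jn
        · rw [if_pos hd, if_pos ⟨hd.1, by omega, hd.2.2⟩]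
        · rw [if_neg hd, if_neg (by
            rintro ⟨ha, hb, hcq⟩
            have hne : r ≠ p + 1 := fun h => hcase ⟨h, hcq⟩
            exact hd ⟨ha, by omega, hcq⟩)]

-- A's table build yields the prefix-sum grid
theorem pvATable (arr : List (List Int)) (n m : Nat) (hn : n = arr.length)
    (hm : m = (PySem.List.pyGetD arr 0 []).length) (q : Nat) (hq : q ≤ m) :
    (PySem.List.pyRange 1 ((q : Int) + 1) 1).foldl (fun cum j =>
        ((PySem.List.pyRange 1 ((n : Int) + 1) 1).foldl (fun (st : Int × List (List Int)) i =>
          let cs := st.1 + pvGetCell arr (i - 1) (j - 1)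
          let cum1 := pvSetCell st.2 i j cs
          let cum2 :=
            if 0 < j then
              pvSetCell cum1 i j (pvGetCell cum1 i j + pvGetCell cum1 i (j - 1))
            else cum1
          (cs, cum2)) (0, cum)).2)
      (pvGrid (fun _ _ => 0) (n + 1) (m + 1))
      = pvGrid (fun r c => if 1 ≤ r ∧ 1 ≤ c ∧ c ≤ q then pvS arr (r : Int) (c : Int) else 0)
          (n + 1) (m + 1) := by
  induction q with
  | zero =>
      rw [show ((0 : Nat) : Int) + 1 = 1 by norm_num,
        PySem.List.pyRange_one_eq_nil (le_refl (1 : Int))]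
      simp only [List.foldl_nil]
      exact pvGrid_congr _ _ _ _ (fun r _ c _ => by rw [if_neg (by omega)])
  | succ q ih =>
      have hq' : q ≤ m := by omega
      have hsplit : PySem.List.pyRange 1 (((q + 1 : Nat) : Int) + 1) 1
          = PySem.List.pyRange 1 ((q : Int) + 1) 1 ++ [(q : Int) + 1] := by
        push_cast
        exact PySem.List.pyRange_one_succ_right (by omega)
      rw [hsplit, List.foldl_append, ih hq']
      simp only [List.foldl_cons, List.foldl_nil]
      rw [show ((q : Int) + 1) = ((q + 1 : Nat) : Int) by push_cast; ring]
      set fprev : Nat → Nat → Int := fun r c => if 1 ≤ r ∧ 1 ≤ c ∧ c ≤ q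
          then pvS arr (r : Int) (c : Int) else 0 with hfprev
      rw [pvAInner arr n m (q + 1) (by omega) (by omega) fprev n (le_refl n)]
      apply pvGrid_congr
      intro r hr c hc
      by_cases hcase : 1 ≤ r ∧ r ≤ n ∧ c = q + 1
      · rw [if_pos hcase, if_pos (by omega)]
        have hfq : fprev r ((q + 1) - 1) = pvS arr (r : Int) (q : Int) := by
          simp only [hfprev, Nat.add_sub_cancel]
          by_cases hq0 : 1 ≤ q
          · rw [if_pos ⟨hcase.1, hq0, le_refl q⟩]
          · rw [if_neg (by omega), show ((q : Nat) : Int) = 0 by omega, pvS_zero]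
        rw [hfq, hcase.2.2, show (((q + 1 : Nat) : Nat) : Int) = (q : Int) + 1 by push_cast; ring,
          pvS_succ arr (r : Int) (q : Int) (by positivity)]
        ring
      · rw [if_neg hcase]
        simp only [hfprev]
        by_cases hd : 1 ≤ r ∧ 1 ≤ c ∧ c ≤ q
        · rw [if_pos hd, if_pos (by omega)]
        · rw [if_neg hd, if_neg (by omega)]

theorem pvSum_map_sub {α : Type} (l : List α) (p q : α → Int) :
    (l.map (fun x => p x - q x)).sum = (l.map p).sum - (l.map q).sum := by
  induction l with
  | nil => simp
  | cons x xs ih => simp [ih]; ring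

theorem pvSum_comm {α β : Type} (l1 : List α) (l2 : List β) (f : α → β → Int) :
    (l1.map (fun x => (l2.map (f x)).sum)).sum
      = (l2.map (fun y => (l1.map (fun x => f x y)).sum)).sum := by
  induction l1 with
  | nil => simp
  | cons x xs ih =>
      simp only [List.map_cons, List.sum_cons, ih]
      have : ∀ (l : List β) (pf qf : β → Int),
          (l.map (fun y => pf y + qf y)).sum = (l.map pf).sum + (l.map qf).sum := by
        intro l pf qf
        induction l with
        | nil => simp
        | cons z zs ih2 => simp [ih2]; ring
      rw [← this]

theorem pvIncExc (arr : List (List Int)) (i k j l : Int)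
    (h1 : 1 ≤ i) (h2 : i ≤ k) (h3 : 1 ≤ j) (h4 : j ≤ l) :
    pvS arr k l - pvS arr k (j - 1) - pvS arr (i - 1) l + pvS arr (i - 1) (j - 1)
      = ((PySem.List.pyRange i (k + 1) 1).map (fun r =>
          ((PySem.List.pyRange j (l + 1) 1).map (fun c => pvGetCell arr (r - 1) (c - 1))).sum)).sum := by
  have hsplitS : ∀ i0 : Int, pvS arr i0 l = pvS arr i0 (j - 1)
      + ((PySem.List.pyRange j (l + 1) 1).map (fun c => pvColS arr c i0)).sum := by
    intro i0
    unfold pvS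
    rw [show j - 1 + 1 = j by ring,
      PySem.List.pyRange_one_append 1 j (l + 1) (by omega) (by omega),
      List.map_append, List.sum_append]
  have hsplitC : ∀ c : Int, pvColS arr c k = pvColS arr c (i - 1)
      + ((PySem.List.pyRange i (k + 1) 1).map (fun r => pvGetCell arr (r - 1) (c - 1))).sum := by
    intro c
    unfold pvColS
    rw [show i - 1 + 1 = i by ring,
      PySem.List.pyRange_one_append 1 i (k + 1) (by omega) (by omega),
      List.map_append, List.sum_append]
  have hcols : ((PySem.List.pyRange j (l + 1) 1).map (fun c => pvColS arr c k)).sum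
      - ((PySem.List.pyRange j (l + 1) 1).map (fun c => pvColS arr c (i - 1))).sum
      = ((PySem.List.pyRange j (l + 1) 1).map (fun c =>
          ((PySem.List.pyRange i (k + 1) 1).map (fun r => pvGetCell arr (r - 1) (c - 1))).sum)).sum := by
    rw [← pvSum_map_sub]
    apply congrArg List.sum
    apply List.map_congr_left
    intro c _
    rw [hsplitC c]
    ring
  rw [hsplitS k, hsplitS (i - 1),
    pvSum_comm (PySem.List.pyRange i (k + 1) 1) (PySem.List.pyRange j (l + 1) 1)
      (fun r c => pvGetCell arr (r - 1) (c - 1))]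
  linarith [hcols]

-- single valid cell: the inclusion-exclusion combination collapses to the direct read
theorem pvSingleCell (arr : List (List Int)) (i j : Int) (h1 : 1 ≤ i) (h3 : 1 ≤ j) :
    pvS arr i j - pvS arr i (j - 1) - pvS arr (i - 1) j + pvS arr (i - 1) (j - 1)
      = pvGetCell arr (i - 1) (j - 1) := by
  rw [pvIncExc arr i i j j h1 (le_refl i) h3 (le_refl j),
    PySem.List.pyRange_one_singleton, PySem.List.pyRange_one_singleton]
  simp

theorem pvGridZero (N M : Nat) :
    pvGrid (fun _ _ => (0 : Int)) N M = List.replicate N (List.replicate M 0) := by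
  simp [pvGrid, List.map_const']

theorem pvInitA (N M : Nat) :
    (PySem.List.pyRange 0 ((N : Int) + 1) 1).map (fun _ =>
        (PySem.List.pyRange 0 ((M : Int) + 1) 1).map (fun _ => (0 : Int)))
      = List.replicate (N + 1) (List.replicate (M + 1) (0 : Int)) := by
  rw [List.map_const', List.map_const', PySem.List.length_pyRange_one,
    PySem.List.length_pyRange_one, show (((M : Int) + 1) - 0).toNat = M + 1 by omega,
    show (((N : Int) + 1) - 0).toNat = N + 1 by omega]

-- a row prefix: sum of the first c entries, as the 1-based indexed sum
theorem pvRowPref (row : List Int) (c : Nat) (hc : c ≤ row.length) :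
    ((PySem.List.pyRange 1 ((c : Int) + 1) 1).map (fun c' => PySem.List.pyGetD row (c' - 1) 0)).sum
      = (row.take c).sum := by
  induction c with
  | zero =>
      rw [show ((0 : Nat) : Int) + 1 = 1 by norm_num,
        PySem.List.pyRange_one_eq_nil (le_refl (1 : Int))]
      simp
  | succ c ih =>
      rw [show (((c + 1 : Nat)) : Int) + 1 = ((c : Int) + 1) + 1 by push_cast; ring,
        PySem.List.pyRange_one_succ_right (by omega : (1 : Int) ≤ (c : Int) + 1),
        List.map_append, List.sum_append, ih (by omega)]
      simp only [List.map_cons, List.map_nil, List.sum_cons, List.sum_nil]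
      rw [show ((c : Int) + 1 - 1) = ((c : Nat) : Int) by ring, PySem.List.pyGetD_natCast,
        List.take_succ, List.sum_append, List.getElem?_eq_getElem (by omega : c < row.length)]
      simp [List.getD, List.getElem?_eq_getElem (show c < row.length by omega)]

-- B's brute-force table entry (sum of the top-left r x c submatrix) equals the prefix sum
theorem pvBEntry (arr : List (List Int)) (m : Nat)
    (hrows : ∀ row ∈ arr, m ≤ row.length)
    (r c : Nat) (hr : r ≤ arr.length) (hc : c ≤ m) :
    ((arr.take r).map (fun row => (row.take c).sum)).sum = pvS arr (r : Int) (c : Int) := by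
  have hrow : pvS arr (r : Int) (c : Int)
      = ((PySem.List.pyRange 1 ((r : Int) + 1) 1).map (fun r' =>
          ((PySem.List.pyRange 1 ((c : Int) + 1) 1).map (fun c' =>
            pvGetCell arr (r' - 1) (c' - 1))).sum)).sum := by
    unfold pvS pvColS
    rw [pvSum_comm]
  rw [hrow]
  clear hrow
  induction r with
  | zero =>
      rw [show ((0 : Nat) : Int) + 1 = 1 by norm_num,
        PySem.List.pyRange_one_eq_nil (le_refl (1 : Int))]
      simp
  | succ r ih =>
      rw [show (((r + 1 : Nat)) : Int) + 1 = ((r : Int) + 1) + 1 by push_cast; ring,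
        PySem.List.pyRange_one_succ_right (by omega : (1 : Int) ≤ (r : Int) + 1),
        List.map_append, List.sum_append, ← ih (by omega)]
      simp only [List.map_cons, List.map_nil, List.sum_cons, List.sum_nil]
      rw [List.take_succ, List.map_append, List.sum_append,
        List.getElem?_eq_getElem (by omega : r < arr.length)]
      congr 1
      simp only [Option.toList_some, List.map_cons, List.map_nil, List.sum_cons, List.sum_nil,
        add_zero]
      have hcell : ∀ c' : Int, pvGetCell arr ((r : Int) + 1 - 1) (c' - 1)
          = PySem.List.pyGetD arr[r] (c' - 1) 0 := by
        intro c'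
        unfold pvGetCell
        rw [show ((r : Int) + 1 - 1) = ((r : Nat) : Int) by ring, PySem.List.pyGetD_natCast]
        congr 1
        exact List.getD_eq_getElem arr [] (show r < arr.length by omega)
      simp only [hcell]
      exact (pvRowPref arr[r] c (le_trans hc (hrows arr[r] (List.getElem_mem _)))).symm

-- B's table build yields the same prefix-sum grid
theorem pvBTable (arr : List (List Int)) (n m : Nat) (hn : n = arr.length)
    (hrows : ∀ row ∈ arr, m ≤ row.length) :
    (PySem.List.pyRange 0 ((n : Int) + 1) 1).map (fun r =>
        (PySem.List.pyRange 0 ((m : Int) + 1) 1).map (fun c =>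
          ((PySem.List.slice arr none (some r)).map
            (fun row => (PySem.List.slice row none (some c)).sum)).sum))
      = pvGrid (fun r c => pvS arr (r : Int) (c : Int)) (n + 1) (m + 1) := by
  rw [show ((n : Int) + 1) = (((n + 1 : Nat)) : Int) by push_cast; ring,
    show ((m : Int) + 1) = (((m + 1 : Nat)) : Int) by push_cast; ring,
    PySem.List.pyRange_zero_natCast, PySem.List.pyRange_zero_natCast]
  simp only [List.map_map]
  unfold pvGrid
  apply List.map_congr_left
  intro r hr
  simp only [Function.comp_apply]
  apply List.map_congr_left
  intro c hc
  simp only [Function.comp_apply, PySem.List.slice_to_natCast]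
  exact pvBEntry arr m hrows r c (by
    rw [← hn]; exact Nat.lt_succ_iff.mp (List.mem_range.mp hr)) (Nat.lt_succ_iff.mp (List.mem_range.mp hc))

-- reading the final prefix-sum grid at any in-range (nonnegative) entry
theorem pvReadTBL (arr : List (List Int)) (n m : Nat) (x y : Int)
    (hx : 0 ≤ x ∧ x ≤ (n : Int)) (hy : 0 ≤ y ∧ y ≤ (m : Int)) :
    pvGetCell (pvGrid (fun r c => pvS arr (r : Int) (c : Int)) (n + 1) (m + 1)) x y
      = pvS arr x y := by
  rw [show x = ((x.toNat : Nat) : Int) by omega, show y = ((y.toNat : Nat) : Int) by omega,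
    pvGetCell_grid _ (n + 1) (m + 1) x.toNat y.toNat (by omega) (by omega)]

-- ===== VERDICT (by name: the statement is the Claim_ definition above) =====
theorem solution_spec : Claim_equal_solution := by
  intro arr queries _ hpre
  show solution arr queries = solution_alt arr queries
  obtain ⟨hne, hrows, hq⟩ := hpre
  simp only [solution, solution_alt]
  rw [pvInitA arr.length (PySem.List.pyGetD arr 0 []).length,
    ← pvGridZero (arr.length + 1) ((PySem.List.pyGetD arr 0 []).length + 1),
    pvATable arr arr.length (PySem.List.pyGetD arr 0 []).length rfl rfl
      (PySem.List.pyGetD arr 0 []).length (le_refl _),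
    pvBTable arr arr.length (PySem.List.pyGetD arr 0 []).length rfl hrows]
  have hA : pvGrid (fun r c => if 1 ≤ r ∧ 1 ≤ c ∧ c ≤ (PySem.List.pyGetD arr 0 []).length
      then pvS arr (r : Int) (c : Int) else 0)
      (arr.length + 1) ((PySem.List.pyGetD arr 0 []).length + 1)
      = pvGrid (fun r c => pvS arr (r : Int) (c : Int))
        (arr.length + 1) ((PySem.List.pyGetD arr 0 []).length + 1) :=
    pvGrid_congr _ _ _ _ (fun r _ c hc => by
      by_cases h : 1 ≤ r ∧ 1 ≤ c
      · rw [if_pos ⟨h.1, h.2, by omega⟩]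
      · rw [if_neg (by omega)]
        have h0 : r = 0 ∨ c = 0 := by omega
        rcases h0 with h0 | h0 <;> rw [h0]
        · rw [Nat.cast_zero, pvS_zero_left]
        · rw [Nat.cast_zero, pvS_zero])
  rw [hA]
  apply PySem.List.foldl_congr_mem
  intro acc q hmem
  obtain ⟨hcellPre, _⟩ := hq q hmem
  by_cases hbr : q.1 ≠ q.2.1 ∨ q.2.2.1 ≠ q.2.2.2
  · rw [if_pos hbr]
  · rw [if_neg hbr]
    rw [not_or, not_ne_iff, not_ne_iff] at hbr
    obtain ⟨hk, hl⟩ := hbr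
    obtain ⟨h1, h2, h3, h4⟩ := hcellPre ⟨hk, hl⟩
    congr 1
    rw [pvReadTBL arr arr.length (PySem.List.pyGetD arr 0 []).length q.2.1 q.2.2.2
        ⟨by omega, by omega⟩ ⟨by omega, by omega⟩,
      pvReadTBL arr arr.length (PySem.List.pyGetD arr 0 []).length q.2.1 (q.2.2.1 - 1)
        ⟨by omega, by omega⟩ ⟨by omega, by omega⟩,
      pvReadTBL arr arr.length (PySem.List.pyGetD arr 0 []).length (q.1 - 1) q.2.2.2
        ⟨by omega, by omega⟩ ⟨by omega, by omega⟩,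
      pvReadTBL arr arr.length (PySem.List.pyGetD arr 0 []).length (q.1 - 1) (q.2.2.1 - 1)
        ⟨by omega, by omega⟩ ⟨by omega, by omega⟩,
      ← hk, ← hl]
    exact (pvSingleCell arr q.1 q.2.2.1 h1 h3).symm
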